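-- pv_equiv track=rewrite | github.com/cumat/DatasetAnnotationApp | backend/routes/dataset-routes.py | find_uncompleted_indices
-- ===== SOURCE A (Python) =====
-- def find_uncompleted_indices(max_index, current_index, completed_indices):
--     # Convert completed indices to a set for faster lookup
--     completed_set = set(completed_indices)
--
--     # Find the previous uncompleted index
--     prev_index = None
--     for i in range(current_index - 1, -1, -1):
--         if i not in completed_set:
--             prev_index = i
--             break
--
--     # Find the next uncompleted index
--     next_index = None
--     for i in range(current_index + 1, max_index + 1):
--         if i not in completed_set:
--             next_index = i
--             break
--
--     return prev_index, next_index
-- ===== SOURCE B (Python) =====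
-- def _walk(cands, cand, step):
--     for c in cands:
--         if c == cand:
--             cand += step
--         else:
--             break
--     return cand
--
--
-- def find_uncompleted_indices(max_index, current_index, completed_indices):
--     comp = set(completed_indices)
--     # previous: walk down from current_index-1 over the completed indices just below it
--     prev_cands = sorted((c for c in comp if 0 <= c < current_index), reverse=True)
--     prev = _walk(prev_cands, current_index - 1, -1)
--     prev_index = prev if prev >= 0 else None
--     # next: walk up from current_index+1 over the completed indices just above it
--     next_cands = sorted(c for c in comp if current_index < c <= max_index)
--     nxt = _walk(next_cands, current_index + 1, 1)
--     next_index = nxt if nxt <= max_index else None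
--     return prev_index, next_index
-- ===== Notes on version B (the rewrite author's own statement) =====
-- stated objective: alternative
-- what changed: Instead of counting down/up from current_index testing each consecutive integer against a hash set until one is uncompleted, B sorts the completed indices lying just below/above current_index and walks along each sorted run to its first gap.
import Mathlib
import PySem

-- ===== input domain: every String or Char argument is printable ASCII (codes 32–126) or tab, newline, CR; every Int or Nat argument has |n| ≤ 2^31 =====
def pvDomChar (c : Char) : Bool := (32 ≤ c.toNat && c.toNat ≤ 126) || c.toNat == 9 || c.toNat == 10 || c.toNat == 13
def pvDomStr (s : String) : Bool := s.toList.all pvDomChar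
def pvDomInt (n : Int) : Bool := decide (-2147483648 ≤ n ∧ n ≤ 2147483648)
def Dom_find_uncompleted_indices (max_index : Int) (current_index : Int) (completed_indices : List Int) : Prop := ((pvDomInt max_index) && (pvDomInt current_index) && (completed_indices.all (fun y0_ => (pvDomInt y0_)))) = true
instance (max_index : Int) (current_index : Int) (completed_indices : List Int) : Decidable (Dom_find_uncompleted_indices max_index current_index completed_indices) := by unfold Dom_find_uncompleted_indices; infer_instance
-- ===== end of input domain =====

-- B finds each neighbour by sorting the completed indices adjacent to current_index and walking the
-- sorted run to the first gap, instead of A's count-down/count-up scan with hash lookups (objective: alternative).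

-- ===== PORT A =====
-- 'for i in range(start, -1, -1): if i not in completed_set: prev_index = i; break'
-- (the Python range is consumed lazily with break, so the loop is ported as this countdown recursion)
def pyFindDown (completed_set : PySem.Set Int) (i : Int) : Option Int :=
  if h : -1 < i then
    if !(PySem.Set.contains completed_set i) then some i
    else pyFindDown completed_set (i - 1)
  else none
termination_by (i + 1).toNat
decreasing_by omega

-- 'for i in range(current_index + 1, max_index + 1): if i not in completed_set: next_index = i; break'
def pyFindUp (completed_set : PySem.Set Int) (stop : Int) (i : Int) : Option Int :=
  if h : i < stop then
    if !(PySem.Set.contains completed_set i) then some i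
    else pyFindUp completed_set stop (i + 1)
  else none
termination_by (stop - i).toNat
decreasing_by omega

def find_uncompleted_indices (max_index : Int) (current_index : Int) (completed_indices : List Int) : Option Int × Option Int :=
  let completed_set : PySem.Set Int := PySem.Set.ofList completed_indices
  let prev_index : Option Int := pyFindDown completed_set (current_index - 1)
  let next_index : Option Int := pyFindUp completed_set (max_index + 1) (current_index + 1)
  (prev_index, next_index)

-- ===== PORT B =====
-- Source B's _walk: advance cand by step while the sorted candidates match it, break at the first gap
def pvWalk (cand step : Int) : List Int → Int
  | [] => cand
  | c :: rest => if c = cand then pvWalk (cand + step) step rest else cand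

def find_uncompleted_indices_alt (max_index : Int) (current_index : Int) (completed_indices : List Int) : Option Int × Option Int :=
  let comp : PySem.Set Int := PySem.Set.ofList completed_indices
  let prevCands : List Int :=
    PySem.List.sorted (comp.filter (fun c => decide (0 ≤ c ∧ c < current_index))) (fun x => x) true
  let prev := pvWalk (current_index - 1) (-1) prevCands
  let prev_index : Option Int := if 0 ≤ prev then some prev else none
  let nextCands : List Int :=
    PySem.List.sorted (comp.filter (fun c => decide (current_index < c ∧ c ≤ max_index))) (fun x => x) false
  let nxt := pvWalk (current_index + 1) 1 nextCands
  let next_index : Option Int := if nxt ≤ max_index then some nxt else none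
  (prev_index, next_index)

-- ===== PRECONDITION & SPEC =====
def Spec_find_uncompleted_indices (max_index : Int) (current_index : Int) (completed_indices : List Int) (out : Option Int × Option Int) : Prop := out = find_uncompleted_indices_alt max_index current_index completed_indices
instance (max_index : Int) (current_index : Int) (completed_indices : List Int) (out : Option Int × Option Int) : Decidable (Spec_find_uncompleted_indices max_index current_index completed_indices out) := by unfold Spec_find_uncompleted_indices; infer_instance

-- ===== CLAIM (what is proved, stated in full; the proofs are below) =====
def Claim_equal_find_uncompleted_indices : Prop := ∀ (max_index : Int) (current_index : Int) (completed_indices : List Int), Dom_find_uncompleted_indices max_index current_index completed_indices → Spec_find_uncompleted_indices max_index current_index completed_indices (find_uncompleted_indices max_index current_index completed_indices)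

-- ===== LEMMAS AND PROOFS =====

-- canonical answers: nearest index not in L, walking down (≥ 0) / up (≤ mx)
def prevSpec (L : List Int) (t : Int) : Option Int :=
  if t < 0 then none else if t ∈ L then prevSpec L (t - 1) else some t
termination_by (t + 1).toNat
decreasing_by omega

def nextSpec (L : List Int) (mx t : Int) : Option Int :=
  if mx < t then none else if t ∈ L then nextSpec L mx (t + 1) else some t
termination_by (mx + 1 - t).toNat
decreasing_by omega

theorem find_prev_eq_prevSpec (L : List Int) (t : Int) :
    pyFindDown (PySem.Set.ofList L) t = prevSpec L t := by
  rw [pyFindDown, prevSpec]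
  by_cases h : t < 0
  · rw [dif_neg (by omega : ¬ (-1 : Int) < t), if_pos h]
  · rw [dif_pos (by omega : (-1 : Int) < t), if_neg h]
    by_cases hm : t ∈ L
    · have hb : PySem.Set.contains (PySem.Set.ofList L) t = true := by
        simp [PySem.Set.mem_ofList, hm]
      rw [hb, if_pos hm]
      simpa using find_prev_eq_prevSpec L (t - 1)
    · have hb : PySem.Set.contains (PySem.Set.ofList L) t = false := by
        simp [PySem.Set.mem_ofList, hm]
      rw [hb, if_neg hm]
      simp
termination_by (t + 1).toNat
decreasing_by omega

theorem find_next_eq_nextSpec (L : List Int) (mx t : Int) :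
    pyFindUp (PySem.Set.ofList L) (mx + 1) t = nextSpec L mx t := by
  rw [pyFindUp, nextSpec]
  by_cases h : mx < t
  · rw [dif_neg (by omega : ¬ t < mx + 1), if_pos h]
  · rw [dif_pos (by omega : t < mx + 1), if_neg h]
    by_cases hm : t ∈ L
    · have hb : PySem.Set.contains (PySem.Set.ofList L) t = true := by
        simp [PySem.Set.mem_ofList, hm]
      rw [hb, if_pos hm]
      simpa using find_next_eq_nextSpec L mx (t + 1)
    · have hb : PySem.Set.contains (PySem.Set.ofList L) t = false := by
        simp [PySem.Set.mem_ofList, hm]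
      rw [hb, if_neg hm]
      simp
termination_by (mx + 1 - t).toNat
decreasing_by omega

theorem walk_prev_eq (L : List Int) (cands : List Int) (t : Int)
    (hsort : cands.Pairwise (· > ·))
    (hmem : ∀ x, x ∈ cands ↔ x ∈ L ∧ 0 ≤ x ∧ x ≤ t) :
    (if 0 ≤ pvWalk t (-1) cands then some (pvWalk t (-1) cands) else none) = prevSpec L t := by
  induction cands generalizing t with
  | nil =>
    simp only [pvWalk]
    rw [prevSpec]
    by_cases h : t < 0
    · rw [if_neg (by omega : ¬ (0 : Int) ≤ t), if_pos h]
    · have hnm : t ∉ L := by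
        intro hm
        have := (hmem t).2 ⟨hm, by omega, le_refl t⟩
        simp at this
      rw [if_pos (by omega : (0 : Int) ≤ t), if_neg h, if_neg hnm]
  | cons c rest ih =>
    have hc := (hmem c).1 (List.mem_cons_self ..)
    rw [prevSpec, if_neg (by omega : ¬ t < 0)]
    by_cases hct : c = t
    · subst hct
      rw [if_pos hc.1]
      have hunf : pvWalk c (-1) (c :: rest) = pvWalk (c - 1) (-1) rest := by
        rw [show c - 1 = c + -1 by ring]
        simp [pvWalk]
      rw [hunf]
      refine ih (c - 1) (List.Pairwise.of_cons hsort) ?_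
      intro x
      constructor
      · intro hx
        have hlt : c > x := (List.pairwise_cons.1 hsort).1 x hx
        have := (hmem x).1 (List.mem_cons_of_mem c hx)
        exact ⟨this.1, this.2.1, by omega⟩
      · rintro ⟨h1, h2, h3⟩
        have hx : x ∈ c :: rest := (hmem x).2 ⟨h1, h2, by omega⟩
        rcases List.mem_cons.1 hx with he | hx
        · omega
        · exact hx
    · have htL : t ∉ L := by
        intro hm
        have hx : t ∈ c :: rest := (hmem t).2 ⟨hm, by omega, le_refl t⟩
        rcases List.mem_cons.1 hx with he | hx
        · exact hct he.symm
        · have : c > t := (List.pairwise_cons.1 hsort).1 t hx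
          omega
      rw [if_neg htL]
      have hstop : pvWalk t (-1) (c :: rest) = t := by
        simp [pvWalk, hct]
      rw [hstop, if_pos (by omega : (0 : Int) ≤ t)]

theorem walk_next_eq (L : List Int) (mx : Int) (cands : List Int) (t : Int)
    (hsort : cands.Pairwise (· < ·))
    (hmem : ∀ x, x ∈ cands ↔ x ∈ L ∧ t ≤ x ∧ x ≤ mx) :
    (if pvWalk t 1 cands ≤ mx then some (pvWalk t 1 cands) else none) = nextSpec L mx t := by
  induction cands generalizing t with
  | nil =>
    simp only [pvWalk]
    rw [nextSpec]
    by_cases h : mx < t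
    · rw [if_neg (by omega : ¬ t ≤ mx), if_pos h]
    · have hnm : t ∉ L := by
        intro hm
        have := (hmem t).2 ⟨hm, le_refl t, by omega⟩
        simp at this
      rw [if_pos (by omega : t ≤ mx), if_neg h, if_neg hnm]
  | cons c rest ih =>
    have hc := (hmem c).1 (List.mem_cons_self ..)
    rw [nextSpec, if_neg (by omega : ¬ mx < t)]
    by_cases hct : c = t
    · subst hct
      rw [if_pos hc.1]
      have hunf : pvWalk c 1 (c :: rest) = pvWalk (c + 1) 1 rest := by
        norm_num [pvWalk]
      rw [hunf]
      refine ih (c + 1) (List.Pairwise.of_cons hsort) ?_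
      intro x
      constructor
      · intro hx
        have hlt : c < x := (List.pairwise_cons.1 hsort).1 x hx
        have := (hmem x).1 (List.mem_cons_of_mem c hx)
        exact ⟨this.1, by omega, this.2.2⟩
      · rintro ⟨h1, h2, h3⟩
        have hx : x ∈ c :: rest := (hmem x).2 ⟨h1, by omega, h3⟩
        rcases List.mem_cons.1 hx with he | hx
        · omega
        · exact hx
    · have htL : t ∉ L := by
        intro hm
        have hx : t ∈ c :: rest := (hmem t).2 ⟨hm, le_refl t, by omega⟩
        rcases List.mem_cons.1 hx with he | hx
        · exact hct he.symm
        · have : c < t := (List.pairwise_cons.1 hsort).1 t hx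
          omega
      rw [if_neg htL]
      have hstop : pvWalk t 1 (c :: rest) = t := by
        simp [pvWalk, hct]
      rw [hstop, if_pos (by omega : t ≤ mx)]

theorem prev_cands_sorted (L : List Int) (cur : Int) :
    (PySem.List.sorted ((PySem.Set.ofList L).filter (fun c => decide (0 ≤ c ∧ c < cur))) (fun x => x) true).Pairwise (· > ·) := by
  have hge := PySem.List.sorted_pairwise_rev ((PySem.Set.ofList L).filter (fun c => decide (0 ≤ c ∧ c < cur))) (fun x => x)
  have hnd : (PySem.List.sorted ((PySem.Set.ofList L).filter (fun c => decide (0 ≤ c ∧ c < cur))) (fun x => x) true).Nodup :=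
    ((PySem.Set.nodup_ofList L).filter _).perm
      (PySem.List.sorted_perm _ _ _).symm
  exact (hge.and hnd).imp (fun hab => by omega)

theorem next_cands_sorted (L : List Int) (cur mx : Int) :
    (PySem.List.sorted ((PySem.Set.ofList L).filter (fun c => decide (cur < c ∧ c ≤ mx))) (fun x => x) false).Pairwise (· < ·) := by
  have hle := PySem.List.sorted_pairwise ((PySem.Set.ofList L).filter (fun c => decide (cur < c ∧ c ≤ mx))) (fun x => x)
  have hnd : (PySem.List.sorted ((PySem.Set.ofList L).filter (fun c => decide (cur < c ∧ c ≤ mx))) (fun x => x) false).Nodup :=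
    ((PySem.Set.nodup_ofList L).filter _).perm
      (PySem.List.sorted_perm _ _ _).symm
  exact (hle.and hnd).imp (fun hab => by omega)

theorem find_uncompleted_indices_spec : Claim_equal_find_uncompleted_indices := by
  intro mx cur L _
  unfold Spec_find_uncompleted_indices find_uncompleted_indices find_uncompleted_indices_alt
  simp only
  rw [find_prev_eq_prevSpec L (cur - 1), find_next_eq_nextSpec L mx (cur + 1)]
  rw [walk_prev_eq L _ (cur - 1) (prev_cands_sorted L cur) ?hp,
      walk_next_eq L mx _ (cur + 1) (next_cands_sorted L cur mx) ?hn]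
  case hp =>
    intro x
    rw [PySem.List.mem_sorted, List.mem_filter]
    simp only [PySem.Set.mem_ofList, decide_eq_true_eq]
    constructor
    · rintro ⟨h1, h2, h3⟩; exact ⟨h1, h2, by omega⟩
    · rintro ⟨h1, h2, h3⟩; exact ⟨h1, h2, by omega⟩
  case hn =>
    intro x
    rw [PySem.List.mem_sorted, List.mem_filter]
    simp only [PySem.Set.mem_ofList, decide_eq_true_eq]
    constructor
    · rintro ⟨h1, h2, h3⟩; exact ⟨h1, by omega, h3⟩
    · rintro ⟨h1, h2, h3⟩; exact ⟨h1, by omega, h3⟩
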